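-- pv_equiv track=rewrite | github.com/felopy/py1 | homework2.py | polindrom2
-- ===== SOURCE A (Python) =====
-- def polindrom2(num):
--     count = 0
--     num1 = num
--     ml = []
--     while num > 0:
--         num = num//10
--         count += 1
--     for i in range(0,count):
--         a = num1 // 10**i
--         ml.append(a%10)
--     for i in range(len(ml)//2):
--         if ml[i] != ml[-(i+1)]:
--             ml[i] = ml[-(i+1)]
--     return ml[:]
-- ===== SOURCE B (Python) =====
-- def polindrom2(num):
--     digits = []
--     m = num
--     while m > 0:
--         digits.append(m % 10)
--         m //= 10
--     n = len(digits)
--     return [digits[n - 1 - i] for i in range(n // 2)] + digits[n // 2:]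
-- ===== Notes on version B (the rewrite author's own statement) =====
-- stated objective: simpler
-- what changed: B extracts the digits in one divmod accumulator loop (m % 10, m //= 10) instead of A's two passes (a digit-count loop plus an indexed loop recomputing 10**i), and builds the mirrored result directly as reversed-back-half + back-half instead of mutating the list in place.
import Mathlib
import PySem

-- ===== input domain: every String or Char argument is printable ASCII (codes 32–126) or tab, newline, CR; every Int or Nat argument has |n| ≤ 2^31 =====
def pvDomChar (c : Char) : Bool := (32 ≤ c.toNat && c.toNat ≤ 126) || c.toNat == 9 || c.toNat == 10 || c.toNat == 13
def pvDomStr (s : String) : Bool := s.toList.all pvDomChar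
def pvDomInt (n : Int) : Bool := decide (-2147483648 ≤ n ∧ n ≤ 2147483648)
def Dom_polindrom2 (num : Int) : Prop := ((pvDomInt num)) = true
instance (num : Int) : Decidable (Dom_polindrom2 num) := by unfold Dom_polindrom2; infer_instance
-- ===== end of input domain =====

-- B replaces A's two-pass digit extraction (digit count + 10**i division) by a single
-- divmod accumulator loop and builds the mirrored list directly instead of mutating in place
-- (objective: simpler).

-- termination of the digit loops: num // 10 shrinks for positive num (cited by both ports)
theorem pvFloordiv10_lt (num : Int) (h : 0 < num) :
    (PySem.Int.floordiv num 10).toNat < num.toNat := by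
  rw [PySem.Int.floordiv_eq_ediv_of_pos (by norm_num)]
  omega

-- ===== PORT A =====
-- while num > 0: num = num//10; count += 1
def pvCountA (num : Int) : Nat :=
  if h : num > 0 then pvCountA (PySem.Int.floordiv num 10) + 1 else 0
termination_by num.toNat
decreasing_by exact pvFloordiv10_lt num h

-- if ml[i] != ml[-(i+1)]: ml[i] = ml[-(i+1)]   (indices always in range here)
def pvMirrorStep (ml : List Int) (i : Int) : List Int :=
  match PySem.List.pyGet? ml i, PySem.List.pyGet? ml (-(i+1)) with
  | some a, some b => if a ≠ b then PySem.List.pySetD ml i b else ml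
  | _, _ => ml

def polindrom2 (num : Int) : List Int :=
  let count := pvCountA num
  let num1 := num
  let ml : List Int := (PySem.List.pyRange 0 (count : Int) 1).foldl
    (fun ml i => ml ++ [PySem.Int.mod (PySem.Int.floordiv num1 (10 ^ i.toNat)) 10]) []
  let ml2 := (PySem.List.pyRange 0 ((ml.length / 2 : Nat) : Int) 1).foldl pvMirrorStep ml
  PySem.List.slice ml2 none none

-- ===== PORT B =====
-- while m > 0: digits.append(m % 10); m //= 10
def pvDigitsB (m : Int) : List Int :=
  if h : m > 0 then PySem.Int.mod m 10 :: pvDigitsB (PySem.Int.floordiv m 10) else []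
termination_by m.toNat
decreasing_by exact pvFloordiv10_lt m h

def polindrom2_alt (num : Int) : List Int :=
  let digits := pvDigitsB num
  let n := digits.length
  ((PySem.List.pyRange 0 ((n / 2 : Nat) : Int) 1).map
      (fun i => (PySem.List.pyGet? digits ((n : Int) - 1 - i)).getD 0))
    ++ PySem.List.slice digits (some ((n / 2 : Nat) : Int)) none

-- ===== PRECONDITION & SPEC =====
def Spec_polindrom2 (num : Int) (out : List Int) : Prop := out = polindrom2_alt num
instance (num : Int) (out : List Int) : Decidable (Spec_polindrom2 num out) := by unfold Spec_polindrom2; infer_instance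

-- ===== CLAIM (what is proved, stated in full; the proofs are below) =====
def Claim_equal_polindrom2 : Prop := ∀ (num : Int), Dom_polindrom2 num → Spec_polindrom2 num (polindrom2 num)

-- ===== LEMMAS AND PROOFS =====

theorem pvRangeCast (n : Nat) :
    PySem.List.pyRange 0 (n : Int) 1 = (List.range n).map (fun (k : Nat) => (k : Int)) := by
  rw [PySem.List.pyRange_one]
  simp

theorem pvFloordivPow (num : Int) (k : Nat) :
    PySem.Int.floordiv (PySem.Int.floordiv num 10) (10 ^ k) = PySem.Int.floordiv num (10 ^ (k + 1)) := by
  rw [PySem.Int.floordiv_eq_ediv_of_pos (b := 10) (by norm_num),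
      PySem.Int.floordiv_eq_ediv_of_pos (by positivity),
      PySem.Int.floordiv_eq_ediv_of_pos (by positivity),
      Int.ediv_ediv_of_nonneg (by norm_num : (0:Int) ≤ 10), pow_succ']

theorem pv_digits_eq (num : Int) :
    (List.range (pvCountA num)).map
      (fun k => PySem.Int.mod (PySem.Int.floordiv num (10 ^ k)) 10) = pvDigitsB num := by
  rw [pvCountA, pvDigitsB]
  by_cases h : num > 0
  · simp only [dif_pos h]
    rw [List.range_succ_eq_map]
    simp only [List.map_cons, List.map_map]
    congr 1
    · norm_num
    · rw [← pv_digits_eq (PySem.Int.floordiv num 10)]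
      apply List.map_congr_left
      intro k _
      simp only [Function.comp_apply]
      rw [pvFloordivPow]
  · simp [h]
termination_by num.toNat
decreasing_by exact pvFloordiv10_lt num h

theorem pv_mirror_inv (l : List Int) (k : Nat) (hk : k ≤ l.length / 2) :
    (List.range k).foldl (fun acc (j : Nat) => pvMirrorStep acc (j : Int)) l =
      (List.range k).map (fun j => l.getD (l.length - 1 - j) 0) ++ l.drop k := by
  induction k with
  | zero => simp
  | succ k ih =>
    have hk' : k ≤ l.length / 2 := by omega
    have h2 : 2 * (k + 1) ≤ l.length := by omega
    have kn : k < l.length := by omega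
    rw [List.range_succ, List.foldl_append, ih hk', List.map_append, List.append_assoc]
    simp only [List.foldl_cons, List.foldl_nil, List.map_cons, List.map_nil]
    have hdrop : l.drop k = l[k] :: l.drop (k + 1) := (List.getElem_cons_drop kn).symm
    rw [hdrop]
    set pre := (List.range k).map (fun j => l.getD (l.length - 1 - j) 0) with hpre
    have hlen : pre.length = k := by simp [hpre]
    have hA : (pre ++ l[k] :: l.drop (k + 1)).length = l.length := by
      simp [hlen]; omega
    unfold pvMirrorStep
    have hget1 : PySem.List.pyGet? (pre ++ l[k] :: l.drop (k + 1)) (k : Int) = some l[k] := by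
      rw [show ((k : Nat) : Int) = (pre.length : Int) by rw [hlen]]
      exact PySem.List.pyGet?_append_length pre (List.drop (k + 1) l) l[k]
    have hidx : l.length - (k + 1) - pre.length = l.length - 2 * k - 1 := by omega
    have hget2 : PySem.List.pyGet? (pre ++ l[k] :: l.drop (k + 1)) (-((k : Int) + 1)) =
        some l[l.length - 1 - k] := by
      rw [show (-((k : Int) + 1)) = -(((k + 1 : Nat)) : Int) by push_cast; ring]
      rw [PySem.List.pyGet?_neg_natCast (xs := pre ++ l[k] :: List.drop (k + 1) l) (k := k + 1)
        (by omega) (by omega)]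
      rw [hA, List.getElem?_append_right (by omega), hidx]
      rw [show l.length - 2 * k - 1 = (l.length - 2 * k - 2) + 1 by omega]
      simp only [List.getElem?_cons_succ]
      rw [List.getElem?_drop]
      rw [show k + 1 + (l.length - 2 * k - 2) = l.length - 1 - k by omega]
      exact List.getElem?_eq_getElem (by omega)
    rw [hget1, hget2]
    have hval : l.getD (l.length - 1 - k) 0 = l[l.length - 1 - k] :=
      List.getD_eq_getElem l 0 (by omega)
    by_cases he : l[k] = l[l.length - 1 - k]
    · simp only [he, ne_eq, not_true_eq_false, ite_false]
      rw [hval, ← he]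
      simp
    · simp only [ne_eq, he, not_false_eq_true, ite_true]
      rw [PySem.List.pySetD_natCast, List.set_append]
      simp only [hlen, Nat.lt_irrefl, if_false, Nat.sub_self, List.append_cancel_left_eq]
      rw [List.set_cons_zero, hval]
      rfl

theorem pv_mirror_eq (l : List Int) :
    (PySem.List.pyRange 0 ((l.length / 2 : Nat) : Int) 1).foldl pvMirrorStep l =
      ((PySem.List.pyRange 0 ((l.length / 2 : Nat) : Int) 1).map
        (fun i => (PySem.List.pyGet? l ((l.length : Int) - 1 - i)).getD 0))
        ++ PySem.List.slice l (some ((l.length / 2 : Nat) : Int)) none := by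
  rw [pvRangeCast, List.foldl_map, List.map_map, PySem.List.slice_from_natCast]
  rw [pv_mirror_inv l (l.length / 2) (le_refl _)]
  congr 1
  apply List.map_congr_left
  intro j hj
  have hjn : j < l.length := by
    have := List.mem_range.mp hj; omega
  simp only [Function.comp_apply]
  rw [show ((l.length : Int) - 1 - (j : Int)) = ((l.length - 1 - j : Nat) : Int) by omega]
  rw [PySem.List.pyGet?_natCast]
  exact List.getD_eq_getElem?_getD

-- ===== VERDICT (by name: the statement is the Claim_ definition above) =====
theorem polindrom2_spec : Claim_equal_polindrom2 := by
  intro num _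
  unfold Spec_polindrom2 polindrom2 polindrom2_alt
  simp only
  have hml : (PySem.List.pyRange 0 ((pvCountA num : Nat) : Int) 1).foldl
      (fun ml i => ml ++ [PySem.Int.mod (PySem.Int.floordiv num (10 ^ i.toNat)) 10]) ([] : List Int)
      = pvDigitsB num := by
    rw [PySem.List.foldl_append_singleton_eq_map, List.nil_append, pvRangeCast, List.map_map]
    rw [← pv_digits_eq num]
    apply List.map_congr_left
    intro k _
    simp
  rw [hml, pv_mirror_eq, PySem.List.slice_none_none]
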